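-- pv_equiv track=rewrite | github.com/holometeamgit/Plane-Detector-Python | core_functions.py | get_homo_chain
-- ===== SOURCE A (Python) =====
-- def get_homo_chain(ind):
--     chain = []
--     cur_ind = ind
--     chain.append(cur_ind)
--     while cur_ind > 0:
--         if cur_ind == 35:
--             cur_ind = 14
--         else:
--             cur_ind = cur_ind - 1
--         chain.append(cur_ind)
--
--     return chain
-- ===== SOURCE B (Python) =====
-- def get_homo_chain(ind):
--     if ind <= 0:
--         return [ind]
--     if ind < 35:
--         return list(range(ind, -1, -1))
--     return list(range(ind, 34, -1)) + list(range(14, -1, -1))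
-- ===== Notes on version B (the rewrite author's own statement) =====
-- stated objective: faster
-- what changed: Replaced the element-by-element decrement loop with a direct closed-form assembly of the chain from range slices (ind down to 35 if any, then 14 down to 0).
import Mathlib
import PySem

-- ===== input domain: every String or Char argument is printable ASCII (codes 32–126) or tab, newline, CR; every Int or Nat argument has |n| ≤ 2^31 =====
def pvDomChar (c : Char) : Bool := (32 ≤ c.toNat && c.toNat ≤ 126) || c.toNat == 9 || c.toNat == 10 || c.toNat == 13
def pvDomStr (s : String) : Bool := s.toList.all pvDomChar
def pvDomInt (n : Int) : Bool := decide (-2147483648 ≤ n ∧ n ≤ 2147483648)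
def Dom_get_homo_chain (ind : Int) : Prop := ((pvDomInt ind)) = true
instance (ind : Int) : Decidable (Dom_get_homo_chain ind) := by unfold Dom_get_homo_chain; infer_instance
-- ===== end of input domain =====

-- B replaces A's decrement loop with a closed-form assembly of the chain from range slices (objective: faster constant factor in Python; same asymptotic output size).

-- ===== PORT A =====
-- the while loop of A: emits each successive cur_ind after the initial append
def getHomoLoop (cur : Int) : List Int :=
  if h : cur > 0 then
    let next : Int := if cur = 35 then 14 else cur - 1
    next :: getHomoLoop next
  else []
termination_by cur.toNat
decreasing_by
  split <;> omega

def get_homo_chain (ind : Int) : List Int := ind :: getHomoLoop ind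

-- ===== PORT B =====
def get_homo_chain_alt (ind : Int) : List Int :=
  if ind ≤ 0 then [ind]
  else if ind < 35 then PySem.List.pyRange ind (-1) (-1)
  else PySem.List.pyRange ind 34 (-1) ++ PySem.List.pyRange 14 (-1) (-1)

-- ===== PRECONDITION & SPEC =====
def Spec_get_homo_chain (ind : Int) (out : List Int) : Prop := out = get_homo_chain_alt ind
instance (ind : Int) (out : List Int) : Decidable (Spec_get_homo_chain ind out) := by unfold Spec_get_homo_chain; infer_instance

-- ===== CLAIM (what is proved, stated in full; the proofs are below) =====
def Claim_equal_get_homo_chain : Prop := ∀ (ind : Int), Dom_get_homo_chain ind → Spec_get_homo_chain ind (get_homo_chain ind)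

-- ===== LEMMAS AND PROOFS =====

theorem getHomoLoop_low : ∀ (n : Nat), n < 35 →
    ((n : Int) :: getHomoLoop n) = PySem.List.pyRange n (-1) (-1) := by
  intro n
  induction n with
  | zero =>
    intro _
    rw [PySem.List.pyRange_neg_one_cons (by norm_num), PySem.List.pyRange_neg_one_eq_nil (by norm_num)]
    rw [getHomoLoop]
    norm_num
  | succ m ih =>
    intro h
    have h35 : ((m : Int) + 1) ≠ 35 := by exact_mod_cast (by omega : (m + 1 : Int) ≠ 35)
    rw [PySem.List.pyRange_neg_one_cons (by push_cast; omega)]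
    rw [getHomoLoop]
    rw [dif_pos (by push_cast; omega)]
    simp only [Nat.cast_succ, if_neg h35, add_sub_cancel_right]
    exact congrArg _ (ih (by omega))

theorem getHomoLoop_high : ∀ (n : Nat),
    ((35 + n : Int) :: getHomoLoop (35 + n)) =
      PySem.List.pyRange (35 + n) 34 (-1) ++ PySem.List.pyRange 14 (-1) (-1) := by
  intro n
  induction n with
  | zero =>
    rw [PySem.List.pyRange_neg_one_cons (by norm_num), PySem.List.pyRange_neg_one_eq_nil (by norm_num)]
    rw [getHomoLoop]
    rw [dif_pos (by norm_num)]
    simp only [if_pos (by norm_num : (35 + (0:Nat) : Int) = 35)]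
    have := getHomoLoop_low 14 (by norm_num)
    norm_num at this ⊢
    exact this
  | succ m ih =>
    have hb : (34 : Int) < 35 + (m + 1 : Nat) := by push_cast; omega
    rw [PySem.List.pyRange_neg_one_cons hb]
    rw [getHomoLoop]
    rw [dif_pos (by push_cast; omega)]
    rw [if_neg (by push_cast; omega)]
    have harg : (35 + (m + 1 : Nat) : Int) - 1 = 35 + (m : Nat) := by push_cast; ring
    rw [harg, List.cons_append]
    exact congrArg _ ih

-- ===== VERDICT (by name: the statement is the Claim_ definition above) =====
theorem get_homo_chain_spec : Claim_equal_get_homo_chain := by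
  intro ind _
  unfold Spec_get_homo_chain get_homo_chain get_homo_chain_alt
  by_cases h0 : ind ≤ 0
  · rw [if_pos h0]
    rw [getHomoLoop]
    rw [dif_neg (by omega)]
  · rw [if_neg h0]
    by_cases h35 : ind < 35
    · rw [if_pos h35]
      have : ind = (ind.toNat : Int) := by omega
      rw [this]
      exact getHomoLoop_low ind.toNat (by omega)
    · rw [if_neg h35]
      have : ind = 35 + ((ind - 35).toNat : Int) := by omega
      rw [this]
      exact getHomoLoop_high (ind - 35).toNat
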